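-- pv_equiv track=rewrite | github.com/HongDaniel/Algorithm | Python/코딩테스트/2022써폿/1번.py | solution
-- ===== SOURCE A (Python) =====
-- def areaOf(x_left, x_right, y_bottom, y_top):
--     return (x_right-x_left)*(y_top-y_bottom)
--
-- def solution(n, m, x_axis, y_axis):
--     answer = 0
--     x_axis.append(n)
--     y_axis.append(m)
--     x_left, x_right = 0, 0
--     candis = []
--     for x in x_axis:
--         x_right = x
--         y_bottom, y_top = 0, 0
--         for y in y_axis:
--             y_top = y
--             candis.append(areaOf(x_left, x_right, y_bottom, y_top))
--             y_bottom = y_top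
--         x_left = x_right
--     return max(candis)
-- ===== SOURCE B (Python) =====
-- def solution(n, m, x_axis, y_axis):
--     # O(len(x)+len(y)) instead of O(len(x)*len(y)): only the extreme gaps
--     # on each axis can yield the extreme product.  Return value only; A
--     # also appends n/m to its argument lists, B does not mutate them.
--     xs = x_axis + [n]
--     ys = y_axis + [m]
--     x_gaps = [b - a for a, b in zip([0] + xs[:-1], xs)]
--     y_gaps = [b - a for a, b in zip([0] + ys[:-1], ys)]
--     mnx, mxx = min(x_gaps), max(x_gaps)
--     mny, mxy = min(y_gaps), max(y_gaps)
--     return max(mxx * mxy, mxx * mny, mnx * mxy, mnx * mny)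
-- ===== Notes on version B (the rewrite author's own statement) =====
-- stated objective: faster
-- what changed: Instead of enumerating every grid cell's area in nested loops, B computes the consecutive gaps of each axis in one pass and combines only the min/max gap of each axis (the maximum product of two values drawn from two lists is a product of extremes); B also does not mutate its argument lists.
import Mathlib
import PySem

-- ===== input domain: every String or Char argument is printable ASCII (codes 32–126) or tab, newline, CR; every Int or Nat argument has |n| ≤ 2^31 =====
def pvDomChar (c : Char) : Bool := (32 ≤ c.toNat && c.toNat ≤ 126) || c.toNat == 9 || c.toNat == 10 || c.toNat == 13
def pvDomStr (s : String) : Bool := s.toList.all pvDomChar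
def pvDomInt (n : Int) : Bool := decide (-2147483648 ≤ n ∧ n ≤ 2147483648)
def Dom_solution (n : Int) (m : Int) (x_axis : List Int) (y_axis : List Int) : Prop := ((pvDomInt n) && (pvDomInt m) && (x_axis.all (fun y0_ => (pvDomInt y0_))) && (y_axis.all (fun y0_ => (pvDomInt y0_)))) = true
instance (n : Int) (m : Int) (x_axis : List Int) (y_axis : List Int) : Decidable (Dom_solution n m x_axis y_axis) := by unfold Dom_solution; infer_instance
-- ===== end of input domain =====

-- B computes only the extreme consecutive gap of each axis and combines the extremes,
-- instead of enumerating every cell; equivalence is about the RETURN value only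
-- (A appends n/m to its argument lists in place, B does not mutate them).

-- ===== PORT A =====
def areaOf (x_left x_right y_bottom y_top : Int) : Int :=
  (x_right - x_left) * (y_top - y_bottom)

def solution (n : Int) (m : Int) (x_axis : List Int) (y_axis : List Int) : Int :=
  let xa := x_axis ++ [n]
  let ya := y_axis ++ [m]
  -- state: (candis, x_left) resp. (candis, y_bottom)
  let res := xa.foldl (fun (st : List Int × Int) x =>
      let inner := ya.foldl (fun (st2 : List Int × Int) y =>
          (st2.1 ++ [areaOf st.2 x st2.2 y], y)) (st.1, 0)
      (inner.1, x)) ([], 0)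
  -- candis is never empty (both augmented axes are nonempty), so Python's max never raises
  (PySem.List.max? res.1 (fun v => v)).getD 0

-- ===== PORT B =====
def solution_alt (n : Int) (m : Int) (x_axis : List Int) (y_axis : List Int) : Int :=
  let xs := x_axis ++ [n]
  let ys := y_axis ++ [m]
  let x_gaps := ((0 :: xs.dropLast).zip xs).map (fun p => p.2 - p.1)
  let y_gaps := ((0 :: ys.dropLast).zip ys).map (fun p => p.2 - p.1)
  -- the gap lists are nonempty, so Python's min/max never raise
  let mnx := (PySem.List.min? x_gaps (fun v => v)).getD 0
  let mxx := (PySem.List.max? x_gaps (fun v => v)).getD 0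
  let mny := (PySem.List.min? y_gaps (fun v => v)).getD 0
  let mxy := (PySem.List.max? y_gaps (fun v => v)).getD 0
  max (max (max (mxx * mxy) (mxx * mny)) (mnx * mxy)) (mnx * mny)

-- ===== PRECONDITION & SPEC =====
def Spec_solution (n : Int) (m : Int) (x_axis : List Int) (y_axis : List Int) (out : Int) : Prop := out = solution_alt n m x_axis y_axis
instance (n : Int) (m : Int) (x_axis : List Int) (y_axis : List Int) (out : Int) : Decidable (Spec_solution n m x_axis y_axis out) := by unfold Spec_solution; infer_instance

-- ===== CLAIM (what is proved, stated in full; the proofs are below) =====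
def Claim_equal_solution : Prop := ∀ (n : Int) (m : Int) (x_axis : List Int) (y_axis : List Int), Dom_solution n m x_axis y_axis → Spec_solution n m x_axis y_axis (solution n m x_axis y_axis)

-- ===== LEMMAS AND PROOFS =====

/-- Consecutive gaps of a list, starting from `p`. -/
def gapsP (p : Int) : List Int → List Int
  | [] => []
  | a :: t => (a - p) :: gapsP a t

theorem gapsP_zip : ∀ (xs : List Int) (p : Int),
    ((p :: xs.dropLast).zip xs).map (fun q => q.2 - q.1) = gapsP p xs := by
  intro xs
  induction xs with
  | nil => intro p; rfl
  | cons a t ih =>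
    intro p
    cases t with
    | nil => rfl
    | cons b u =>
      simp only [List.dropLast_cons₂, List.zip_cons_cons, List.map_cons, gapsP]
      exact congrArg _ (ih a)

theorem gapsP_length : ∀ (xs : List Int) (p : Int), (gapsP p xs).length = xs.length := by
  intro xs; induction xs with
  | nil => intro p; rfl
  | cons a t ih => intro p; simp [gapsP, ih a]

theorem gapsP_ne_nil (xs : List Int) (x p : Int) : gapsP p (xs ++ [x]) ≠ [] := by
  intro h
  have := gapsP_length (xs ++ [x]) p
  rw [h] at this
  simp at this

/-- A's inner loop: appends the areas of one row of cells. -/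
theorem inner_loop (xl xr : Int) : ∀ (l acc : List Int) (p : Int),
    l.foldl (fun (st2 : List Int × Int) y => (st2.1 ++ [areaOf xl xr st2.2 y], y)) (acc, p)
      = (acc ++ (gapsP p l).map (fun dy => (xr - xl) * dy), l.getLastD p) := by
  intro l
  induction l with
  | nil => intro acc p; simp [gapsP]
  | cons a t ih =>
    intro acc p
    simp only [List.foldl_cons, ih, gapsP, List.map_cons, List.getLastD_cons]
    simp [areaOf]

/-- A's outer loop: the candidate list is the cross product of the gap lists. -/
theorem outer_loop (ya : List Int) : ∀ (l acc : List Int) (p : Int),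
    l.foldl (fun (st : List Int × Int) x =>
        ((ya.foldl (fun (st2 : List Int × Int) y => (st2.1 ++ [areaOf st.2 x st2.2 y], y)) (st.1, 0)).1, x)) (acc, p)
      = (acc ++ (gapsP p l).flatMap (fun dx => (gapsP 0 ya).map (fun dy => dx * dy)), l.getLastD p) := by
  intro l
  induction l with
  | nil => intro acc p; simp [gapsP]
  | cons a t ih =>
    intro acc p
    simp only [List.foldl_cons, gapsP, List.flatMap_cons, List.getLastD_cons]
    rw [inner_loop p a ya acc 0, ih]
    simp [List.append_assoc]

/-- Python `max(xs)` returns the (unique) maximum value when one is exhibited. -/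
theorem pyMax_eq (xs : List Int) (M : Int) (hM : M ∈ xs) (hub : ∀ y ∈ xs, y ≤ M) :
    (PySem.List.max? xs (fun v => v)).getD 0 = M := by
  cases xs with
  | nil => cases hM
  | cons h t =>
    rw [PySem.List.max?_id_cons, Option.getD_some]
    apply le_antisymm
    · rcases PySem.List.foldl_max_mem t h with he | he
      · rw [he]; exact hub h (List.mem_cons_self ..)
      · exact hub _ (List.mem_cons_of_mem _ he)
    · rcases List.mem_cons.mp hM with he | he
      · exact he ▸ (PySem.List.le_foldl_max t h).1
      · exact (PySem.List.le_foldl_max t h).2 _ he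

/-- Python `min(xs)` on a nonempty list: membership and lower bound. -/
theorem pyMin_spec (xs : List Int) (hne : xs ≠ []) :
    (PySem.List.min? xs (fun v => v)).getD 0 ∈ xs ∧
      ∀ y ∈ xs, (PySem.List.min? xs (fun v => v)).getD 0 ≤ y := by
  obtain ⟨v, hv⟩ : ∃ v, PySem.List.min? xs (fun v => v) = some v := by
    cases hmin : PySem.List.min? xs (fun v => v) with
    | none => exact absurd ((PySem.List.min?_eq_none_iff _ _).mp hmin) hne
    | some v => exact ⟨v, rfl⟩
  rw [hv, Option.getD_some]
  exact ⟨PySem.List.min?_mem hv, PySem.List.min?_isMin hv⟩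

theorem pyMax_spec (xs : List Int) (hne : xs ≠ []) :
    (PySem.List.max? xs (fun v => v)).getD 0 ∈ xs ∧
      ∀ y ∈ xs, y ≤ (PySem.List.max? xs (fun v => v)).getD 0 := by
  obtain ⟨v, hv⟩ : ∃ v, PySem.List.max? xs (fun v => v) = some v := by
    cases hmax : PySem.List.max? xs (fun v => v) with
    | none => exact absurd ((PySem.List.max?_eq_none_iff _ _).mp hmax) hne
    | some v => exact ⟨v, rfl⟩
  rw [hv, Option.getD_some]
  exact ⟨PySem.List.max?_mem hv, PySem.List.max?_isMax hv⟩

/-- A product of values between the stated extremes is at most the max of products of extremes. -/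
theorem prod_le_extremes (a b mn1 mx1 mn2 mx2 : Int)
    (h1 : mn1 ≤ a) (h2 : a ≤ mx1) (h3 : mn2 ≤ b) (h4 : b ≤ mx2) :
    a * b ≤ max (max (max (mx1 * mx2) (mx1 * mn2)) (mn1 * mx2)) (mn1 * mn2) := by
  have P1 : mx1 * mx2 ≤ max (max (max (mx1 * mx2) (mx1 * mn2)) (mn1 * mx2)) (mn1 * mn2) :=
    le_max_of_le_left (le_max_of_le_left (le_max_left _ _))
  have P2 : mx1 * mn2 ≤ max (max (max (mx1 * mx2) (mx1 * mn2)) (mn1 * mx2)) (mn1 * mn2) :=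
    le_max_of_le_left (le_max_of_le_left (le_max_right _ _))
  have P3 : mn1 * mx2 ≤ max (max (max (mx1 * mx2) (mx1 * mn2)) (mn1 * mx2)) (mn1 * mn2) :=
    le_max_of_le_left (le_max_right _ _)
  have P4 : mn1 * mn2 ≤ max (max (max (mx1 * mx2) (mx1 * mn2)) (mn1 * mx2)) (mn1 * mn2) :=
    le_max_right _ _
  have step1 : a * b ≤ max (mx1 * b) (mn1 * b) := by
    rcases le_total 0 b with hb | hb
    · exact le_max_of_le_left (mul_le_mul_of_nonneg_right h2 hb)
    · exact le_max_of_le_right (mul_le_mul_of_nonpos_right h1 hb)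
  refine le_trans step1 (max_le ?_ ?_)
  · rcases le_total 0 mx1 with hm | hm
    · exact le_trans (mul_le_mul_of_nonneg_left h4 hm) P1
    · exact le_trans (mul_le_mul_of_nonpos_left h3 hm) P2
  · rcases le_total 0 mn1 with hm | hm
    · exact le_trans (mul_le_mul_of_nonneg_left h4 hm) P3
    · exact le_trans (mul_le_mul_of_nonpos_left h3 hm) P4

/-- The max of the four extreme products is itself one of the four. -/
theorem max4_choice (P1 P2 P3 P4 : Int) :
    max (max (max P1 P2) P3) P4 = P1 ∨ max (max (max P1 P2) P3) P4 = P2 ∨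
    max (max (max P1 P2) P3) P4 = P3 ∨ max (max (max P1 P2) P3) P4 = P4 := by
  rcases max_choice (max (max P1 P2) P3) P4 with h | h
  · rw [h]
    rcases max_choice (max P1 P2) P3 with h' | h'
    · rw [h']
      rcases max_choice P1 P2 with h'' | h''
      · exact Or.inl h''
      · exact Or.inr (Or.inl h'')
    · exact Or.inr (Or.inr (Or.inl h'))
  · exact Or.inr (Or.inr (Or.inr h))

-- ===== VERDICT (by name: the statement is the Claim_ definition above) =====
theorem solution_spec : Claim_equal_solution := by
  intro n m X Y _
  unfold Spec_solution solution solution_alt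
  simp only [gapsP_zip]
  rw [outer_loop (Y ++ [m]) (X ++ [n]) [] 0]
  simp only [List.nil_append]
  set Xg := gapsP 0 (X ++ [n]) with hXg
  set Yg := gapsP 0 (Y ++ [m]) with hYg
  have hXne : Xg ≠ [] := gapsP_ne_nil X n 0
  have hYne : Yg ≠ [] := gapsP_ne_nil Y m 0
  set C := Xg.flatMap (fun dx => Yg.map (fun dy => dx * dy)) with hC
  have memC : ∀ a ∈ Xg, ∀ b ∈ Yg, a * b ∈ C := by
    intro a ha b hb
    simp only [hC, List.mem_flatMap, List.mem_map]
    exact ⟨a, ha, b, hb, rfl⟩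
  obtain ⟨hmnx, hmnx_le⟩ := pyMin_spec Xg hXne
  obtain ⟨hmxx, hmxx_ge⟩ := pyMax_spec Xg hXne
  obtain ⟨hmny, hmny_le⟩ := pyMin_spec Yg hYne
  obtain ⟨hmxy, hmxy_ge⟩ := pyMax_spec Yg hYne
  set mnx := (PySem.List.min? Xg (fun v => v)).getD 0
  set mxx := (PySem.List.max? Xg (fun v => v)).getD 0
  set mny := (PySem.List.min? Yg (fun v => v)).getD 0
  set mxy := (PySem.List.max? Yg (fun v => v)).getD 0
  set M := max (max (max (mxx * mxy) (mxx * mny)) (mnx * mxy)) (mnx * mny) with hM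
  apply pyMax_eq
  · -- M ∈ C : it is one of the four extreme products
    rcases max4_choice (mxx * mxy) (mxx * mny) (mnx * mxy) (mnx * mny) with h | h | h | h <;>
      rw [hM, h]
    · exact memC _ hmxx _ hmxy
    · exact memC _ hmxx _ hmny
    · exact memC _ hmnx _ hmxy
    · exact memC _ hmnx _ hmny
  · -- every candidate area is ≤ M
    intro y hy
    simp only [hC, List.mem_flatMap, List.mem_map] at hy
    obtain ⟨a, ha, b, hb, rfl⟩ := hy
    exact prod_le_extremes a b mnx mxx mny mxy (hmnx_le a ha) (hmxx_ge a ha)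
      (hmny_le b hb) (hmxy_ge b hb)
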